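-- pv_equiv track=rewrite | github.com/JustaSqu1d/SpellCast-Solver | solver/utils.py | is_prefix_valid
-- ===== SOURCE A (Python) =====
-- from typing import List
--
-- def is_prefix_valid(words: List[str], word: str) -> bool:
--     """Checks if any word starts with this prefix using binary search"""
--     word = word.upper()
--     if not words:
--         return False
--     if len(words) == 1:
--         return words[0].startswith(word)
--     mid = len(words) // 2
--     if words[mid].startswith(word):
--         return True
--     elif words[mid] < word:
--         return is_prefix_valid(words[mid:], word)
--     else:
--         return is_prefix_valid(words[:mid], word)
-- ===== SOURCE B (Python) =====
-- def is_prefix_valid(words, word):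
--     """Checks if any word starts with this prefix, via an index-based (non-slicing) binary search."""
--     word = word.upper()
--     lo, hi = 0, len(words)
--     while hi - lo > 1:
--         mid = lo + (hi - lo) // 2
--         if words[mid].startswith(word):
--             return True
--         if words[mid] < word:
--             lo = mid
--         else:
--             hi = mid
--     return lo < hi and words[lo].startswith(word)
-- ===== Notes on version B (the rewrite author's own statement) =====
-- stated objective: alternative
-- what changed: Replaced the recursive binary search that copies words[mid:] / words[:mid] list slices at every step by an iterative lo/hi index-based binary search that never copies the list.
import Mathlib
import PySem

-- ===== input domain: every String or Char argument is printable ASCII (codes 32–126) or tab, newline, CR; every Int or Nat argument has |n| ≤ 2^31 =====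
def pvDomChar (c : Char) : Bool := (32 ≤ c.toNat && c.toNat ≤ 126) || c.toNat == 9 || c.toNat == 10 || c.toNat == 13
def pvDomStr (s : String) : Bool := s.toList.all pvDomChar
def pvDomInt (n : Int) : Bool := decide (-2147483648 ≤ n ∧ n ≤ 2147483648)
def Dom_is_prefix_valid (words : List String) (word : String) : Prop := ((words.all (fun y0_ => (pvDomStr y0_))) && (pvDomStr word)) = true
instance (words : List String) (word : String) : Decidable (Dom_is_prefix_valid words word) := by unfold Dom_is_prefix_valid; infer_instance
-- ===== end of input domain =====

-- B replaces A's slice-copying recursion by an index-based lo/hi binary-search loop (no list copies).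

-- ===== PORT A =====
-- A: recursive binary search that materialises words[mid:] / words[:mid] at each step.
def is_prefix_valid (words : List String) (word : String) : Bool :=
  let w := PySem.Str.upper word
  if _h0 : words = [] then false
  else if _h1 : words.length = 1 then PySem.Str.startswith (words.getD 0 "") w
  else
    let mid := words.length / 2
    if PySem.Str.startswith (words.getD mid "") w then true
    else if words.getD mid "" < w then
      is_prefix_valid (PySem.List.slice words (some (mid : Int)) none) w
    else
      is_prefix_valid (PySem.List.slice words none (some (mid : Int))) w
termination_by words.length
decreasing_by
  · rw [PySem.List.slice_from_natCast]
    have : words.length ≠ 0 := by simpa [List.length_eq_zero_iff] using _h0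
    simp only [List.length_drop]
    omega
  · rw [PySem.List.slice_to_natCast]
    have : words.length ≠ 0 := by simpa [List.length_eq_zero_iff] using _h0
    simp only [List.length_take]
    omega

-- ===== PORT B =====
-- B: while hi - lo > 1: probe words[lo + (hi-lo)//2], move lo or hi; finally test words[lo].
def isPrefixValidLoop (words : List String) (word : String) (lo hi : Nat) : Bool :=
  if _h : 1 < hi - lo then
    let mid := lo + (hi - lo) / 2
    if PySem.Str.startswith (words.getD mid "") word then true
    else if words.getD mid "" < word then
      isPrefixValidLoop words word mid hi
    else
      isPrefixValidLoop words word lo mid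
  else decide (lo < hi) && PySem.Str.startswith (words.getD lo "") word
termination_by hi - lo
decreasing_by
  · omega
  · omega

def is_prefix_valid_alt (words : List String) (word : String) : Bool :=
  isPrefixValidLoop words (PySem.Str.upper word) 0 words.length

-- ===== PRECONDITION & SPEC =====
def Spec_is_prefix_valid (words : List String) (word : String) (out : Bool) : Prop := out = is_prefix_valid_alt words word
instance (words : List String) (word : String) (out : Bool) : Decidable (Spec_is_prefix_valid words word out) := by unfold Spec_is_prefix_valid; infer_instance

-- ===== CLAIM (what is proved, stated in full; the proofs are below) =====
def Claim_equal_is_prefix_valid : Prop := ∀ (words : List String) (word : String), Dom_is_prefix_valid words word → Spec_is_prefix_valid words word (is_prefix_valid words word)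

-- ===== LEMMAS AND PROOFS =====

lemma upperChar_idem (c : Char) :
    PySem.Chars.upperChar (PySem.Chars.upperChar c) = PySem.Chars.upperChar c := by
  unfold PySem.Chars.upperChar PySem.Chars.islower
  split_ifs with h1 h2 <;> try rfl
  · exfalso
    simp only [Bool.and_eq_true, decide_eq_true_eq] at h1 h2
    have l1 : 97 ≤ c.toNat := Fin.mk_le_mk.mp h1.1
    have l2 : c.toNat ≤ 122 := Fin.mk_le_mk.mp h1.2
    have hv : (Char.ofNat (c.toNat - 32)).toNat = c.toNat - 32 := by
      rw [Char.toNat_ofNat, if_pos (by left; omega)]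
    have l3 : 97 ≤ (Char.ofNat (c.toNat - 32)).toNat := Fin.mk_le_mk.mp h2.1
    omega

lemma upper_idem (s : String) :
    PySem.Str.upper (PySem.Str.upper s) = PySem.Str.upper s := by
  unfold PySem.Str.upper
  congr 1
  rw [String.toList_ofList]
  unfold PySem.Chars.upper
  rw [List.map_map]
  exact List.map_congr_left (fun c _ => upperChar_idem c)

lemma loop_eq (n : Nat) : ∀ (words : List String) (word : String) (lo hi : Nat),
    hi - lo = n → hi ≤ words.length →
    is_prefix_valid ((words.drop lo).take (hi - lo)) word
      = isPrefixValidLoop words (PySem.Str.upper word) lo hi := by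
  induction n using Nat.strong_induction_on with
  | _ n IH =>
    intro words word lo hi hn hhi
    rw [is_prefix_valid, isPrefixValidLoop]
    set sub : List String := (words.drop lo).take (hi - lo) with hsub
    have hlen : sub.length = hi - lo := by
      simp [hsub, List.length_take, List.length_drop]; omega
    by_cases hcase : 1 < hi - lo
    · -- at least two elements
      have hne : ¬ sub = [] := by
        intro h; rw [h] at hlen; simp at hlen; omega
      have hne1 : ¬ sub.length = 1 := by omega
      rw [dif_neg hne, dif_neg hne1, dif_pos hcase]
      simp only []
      have hmidlt : lo + (hi - lo) / 2 < words.length := by omega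
      have hmidsub : sub.length / 2 < sub.length := by omega
      have h2 : sub.length / 2 = (hi - lo) / 2 := by rw [hlen]
      have hget : sub.getD (sub.length / 2) "" = words.getD (lo + (hi - lo) / 2) "" := by
        rw [h2, List.getD_eq_getElem _ _ (by omega), List.getD_eq_getElem _ _ hmidlt]
        simp only [hsub, List.getElem_take, List.getElem_drop]
      rw [hget]
      by_cases hsw : PySem.Str.startswith (words.getD (lo + (hi - lo) / 2) "") (PySem.Str.upper word) = true
      · rw [if_pos hsw, if_pos hsw]
      · rw [if_neg hsw, if_neg hsw]
        by_cases hlt : words.getD (lo + (hi - lo) / 2) "" < PySem.Str.upper word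
        · rw [if_pos hlt, if_pos hlt]
          have hslice : PySem.List.slice sub (some ((sub.length / 2 : Nat) : Int)) none
              = (words.drop (lo + (hi - lo) / 2)).take (hi - (lo + (hi - lo) / 2)) := by
            rw [PySem.List.slice_from_natCast, h2, hsub, List.drop_take, List.drop_drop]
            have e1 : hi - lo - (hi - lo) / 2 = hi - (lo + (hi - lo) / 2) := by omega
            rw [e1]
          rw [hslice,
            IH (hi - (lo + (hi - lo) / 2)) (by omega) words (PySem.Str.upper word)
              (lo + (hi - lo) / 2) hi rfl hhi, upper_idem]
        · rw [if_neg hlt, if_neg hlt]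
          have hslice : PySem.List.slice sub none (some ((sub.length / 2 : Nat) : Int))
              = (words.drop lo).take ((lo + (hi - lo) / 2) - lo) := by
            rw [PySem.List.slice_to_natCast, h2, hsub, List.take_take]
            have e : min ((hi - lo) / 2) (hi - lo) = lo + (hi - lo) / 2 - lo := by omega
            rw [e]
          rw [hslice,
            IH ((lo + (hi - lo) / 2) - lo) (by omega) words (PySem.Str.upper word)
              lo (lo + (hi - lo) / 2) rfl (by omega), upper_idem]
    · -- hi - lo is 0 or 1
      rw [dif_neg hcase]
      by_cases h0 : hi - lo = 0
      · have hnil : sub = [] := by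
          rw [← List.length_eq_zero_iff, hlen, h0]
        rw [dif_pos hnil]
        have : ¬ lo < hi := by omega
        simp [this]
      · have h1 : hi - lo = 1 := by omega
        have hne : ¬ sub = [] := by
          intro h; rw [h] at hlen; simp at hlen; omega
        have hlen1 : sub.length = 1 := by omega
        rw [dif_neg hne, dif_pos hlen1]
        have hlolt : lo < words.length := by omega
        have hget : sub.getD 0 "" = words.getD lo "" := by
          rw [List.getD_eq_getElem _ _ (by omega), List.getD_eq_getElem _ _ hlolt]
          simp [hsub, List.getElem_take, List.getElem_drop]
        have hlohi : lo < hi := by omega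
        rw [hget]
        simp [hlohi]

-- ===== VERDICT (by name: the statement is the Claim_ definition above) =====
theorem is_prefix_valid_spec : Claim_equal_is_prefix_valid := by
  intro words word _hdom
  unfold Spec_is_prefix_valid is_prefix_valid_alt
  have := loop_eq words.length words word 0 words.length rfl le_rfl
  simpa using this
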